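-- pv_equiv track=rewrite | github.com/Ontotext-AD/qa-eval | qa_eval/steps/sparql.py | get_permutation_indices
-- ===== SOURCE A (Python) =====
-- from collections import Counter, defaultdict
--
-- def get_permutation_indices(list1: list, list2: list) -> list:
--     if len(list1) != len(list2) or Counter(list1) != Counter(list2):
--         return []
--
--     indices = []
--     used = [False] * len(list1)
--
--     for item2 in list2:
--         for i in range(len(list1)):
--             if not used[i] and list1[i] == item2:
--                 indices.append(i)
--                 used[i] = True
--                 break
--
--     return indices
-- ===== SOURCE B (Python) =====
-- from collections import Counter, defaultdict, deque
--
-- def get_permutation_indices(list1: list, list2: list) -> list: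
--     if len(list1) != len(list2) or Counter(list1) != Counter(list2):
--         return []
--     pos = defaultdict(deque)
--     for i, v in enumerate(list1):
--         pos[v].append(i)
--     return [pos[v].popleft() for v in list2]
-- ===== Notes on version B (the rewrite author's own statement) =====
-- stated objective: faster
-- what changed: Replaces the quadratic per-item scan for the first unused matching index by a dict mapping each value to a deque of its indices in list1, built once and popped from the left per list2 item.
import Mathlib
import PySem

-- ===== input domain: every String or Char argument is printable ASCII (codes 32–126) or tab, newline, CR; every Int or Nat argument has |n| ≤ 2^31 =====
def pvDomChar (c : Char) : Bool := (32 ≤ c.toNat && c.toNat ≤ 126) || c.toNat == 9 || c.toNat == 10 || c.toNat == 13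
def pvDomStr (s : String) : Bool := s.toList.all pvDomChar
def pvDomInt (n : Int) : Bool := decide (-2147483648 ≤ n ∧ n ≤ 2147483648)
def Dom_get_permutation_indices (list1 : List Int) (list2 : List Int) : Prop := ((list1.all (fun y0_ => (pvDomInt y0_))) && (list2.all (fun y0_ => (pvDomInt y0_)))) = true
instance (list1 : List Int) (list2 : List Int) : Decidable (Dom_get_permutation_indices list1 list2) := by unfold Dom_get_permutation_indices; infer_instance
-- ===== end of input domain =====

-- B replaces A's quadratic first-unused-match scan by a dict value -> queue of indices,
-- built once and popped from the left (objective: faster; same return value everywhere).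

-- shared guard: Counter(list1) == Counter(list2) (Python dict ==, order-ignoring:
-- equal multiplicity for every key occurring on either side)
def pvCounterEq (l1 l2 : List Int) : Bool :=
  (l1 ++ l2).all (fun v =>
    (PySem.Dict.counter l1).getD v 0 == (PySem.Dict.counter l2).getD v 0)

-- ===== PORT A =====
-- inner loop: for i in range(len(list1)): if not used[i] and list1[i] == item2: … break
def pvFirstIdx (list1 : List Int) (used : List Bool) (item2 : Int) : Option Nat :=
  (List.range list1.length).find? (fun i => !(used.getD i true) && (list1.getD i 0 == item2))

def get_permutation_indices (list1 : List Int) (list2 : List Int) : List Int :=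
  if list1.length ≠ list2.length ∨ pvCounterEq list1 list2 = false then []
  else
    (list2.foldl (fun st item2 =>
      match pvFirstIdx list1 st.2 item2 with
      | some i => (st.1 ++ [(i : Int)], st.2.set i true)
      | none => st) ([], List.replicate list1.length false)).1

-- ===== PORT B =====
-- pos = defaultdict(deque); for i, v in enumerate(list1): pos[v].append(i)
def pvBuildPos (list1 : List Int) : PySem.Dict Int (List Int) :=
  (PySem.List.enumerate list1).foldl
    (fun d p => d.modify p.2 [] (· ++ [p.1])) PySem.Dict.empty

def get_permutation_indices_alt (list1 : List Int) (list2 : List Int) : List Int :=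
  if list1.length ≠ list2.length ∨ pvCounterEq list1 list2 = false then []
  else
    (list2.foldl (fun st v =>
      match st.1.getD v [] with
      | [] => st        -- unreachable: the guard makes every queue nonempty (Python would raise IndexError)
      | i :: rest => (st.1.insert v rest, st.2 ++ [i]))
      (pvBuildPos list1, ([] : List Int))).2

-- ===== PRECONDITION & SPEC =====
def Spec_get_permutation_indices (list1 : List Int) (list2 : List Int) (out : List Int) : Prop := out = get_permutation_indices_alt list1 list2
instance (list1 : List Int) (list2 : List Int) (out : List Int) : Decidable (Spec_get_permutation_indices list1 list2 out) := by unfold Spec_get_permutation_indices; infer_instance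

-- ===== CLAIM (what is proved, stated in full; the proofs are below) =====
def Claim_equal_get_permutation_indices : Prop := ∀ (list1 : List Int) (list2 : List Int), Dom_get_permutation_indices list1 list2 → Spec_get_permutation_indices list1 list2 (get_permutation_indices list1 list2)

-- ===== LEMMAS AND PROOFS =====

-- indices of list1 still available for value v, given the used mask (A's view of the state)
def pvAvail (l1 : List Int) (used : List Bool) (v : Int) : List Nat :=
  (List.range l1.length).filter (fun i => !(used.getD i true) && (l1.getD i 0 == v))

theorem pv_firstIdx_eq (l1 : List Int) (used : List Bool) (v : Int) :
    pvFirstIdx l1 used v = (pvAvail l1 used v).head? := by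
  unfold pvFirstIdx pvAvail
  exact List.head?_filter.symm

-- the built dict: queue for v = indices of v in l1, in order
theorem pv_buildPos_aux (l : List (Int × Int)) (d : PySem.Dict Int (List Int)) (v : Int) :
    (l.foldl (fun d p => d.modify p.2 [] (· ++ [p.1])) d).getD v []
      = d.getD v [] ++ (l.filter (fun p => p.2 == v)).map (·.1) := by
  induction l generalizing d with
  | nil => simp
  | cons a l ih =>
    simp only [List.foldl_cons, List.filter]
    by_cases h : a.2 = v
    · subst h
      simp [ih, PySem.Dict.getD_modify_self]
    · have h2 : (a.2 == v) = false := beq_eq_false_iff_ne.mpr h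
      simp [h2, ih, PySem.Dict.getD_modify_of_ne _ _ _ (fun he => h he.symm)]

theorem pv_buildPos_getD (l1 : List Int) (v : Int) :
    (pvBuildPos l1).getD v []
      = ((List.range l1.length).filter (fun i => l1.getD i 0 == v)).map (fun i => Int.ofNat i) := by
  unfold pvBuildPos
  rw [pv_buildPos_aux, PySem.Dict.getD_empty, List.nil_append]
  induction l1 using List.reverseRecOn with
  | nil => rfl
  | append_singleton l x ih =>
    rw [PySem.List.enumerate_append, List.filter_append, List.map_append]
    have hlen : (l ++ [x]).length = l.length + 1 := by simp
    rw [hlen, List.range_succ, List.filter_append, List.map_append]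
    congr 1
    · rw [ih]
      congr 1
      apply List.filter_congr
      intro i hi
      rw [List.getD_append _ _ _ _ (List.mem_range.mp hi)]
    · have hx : (l ++ [x]).getD l.length 0 = x := by
        rw [List.getD_append_right _ _ _ _ (le_refl _)]
        simp
      by_cases h : x = v
      · subst h
        simp [PySem.List.enumerate]
      · have h2 : (x == v) = false := beq_eq_false_iff_ne.mpr h
        simp [PySem.List.enumerate, h2]

-- pvAvail at the initial all-false mask
theorem pv_avail_init (l1 : List Int) (v : Int) :
    pvAvail l1 (List.replicate l1.length false) v
      = (List.range l1.length).filter (fun i => l1.getD i 0 == v) := by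
  apply List.filter_congr; intro i hi
  simp [List.getD_eq_getElem?_getD, List.mem_range.mp hi]

-- setting used[i] for an index carrying value x leaves the queues of other values untouched
theorem pv_avail_set_ne (l1 : List Int) (used : List Bool) (x v : Int) (i : Nat)
    (hx : l1.getD i 0 = x) (hne : v ≠ x) :
    pvAvail l1 (used.set i true) v = pvAvail l1 used v := by
  apply List.filter_congr; intro j _
  by_cases h : j = i
  · subst h
    have hxv : (l1.getD j 0 == v) = false := beq_eq_false_iff_ne.mpr (hx ▸ fun he => hne he.symm)
    simp only [hxv, Bool.and_false]
  · rw [List.getD_eq_getElem?_getD (l := used.set i true),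
      List.getElem?_set_ne (fun he => h he.symm), ← List.getD_eq_getElem?_getD]

-- and pops the head of the queue of x itself
theorem pv_avail_set_head (l1 : List Int) (used : List Bool) (x : Int) (i : Nat) (rest : List Nat)
    (hlen : used.length = l1.length)
    (h : pvAvail l1 used x = i :: rest) :
    pvAvail l1 (used.set i true) x = rest := by
  have hi_lt : i < l1.length := by
    have hm : i ∈ pvAvail l1 used x := by rw [h]; exact List.mem_cons_self
    simpa [List.mem_range] using List.mem_of_mem_filter hm
  have hnodup : (i :: rest).Nodup := h ▸ (List.nodup_range).filter _
  have hstep : pvAvail l1 (used.set i true) x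
      = (pvAvail l1 used x).filter (fun j => !(j == i)) := by
    unfold pvAvail
    rw [List.filter_filter]
    apply List.filter_congr
    intro j _
    by_cases hji : j = i
    · subst hji
      simp [List.getD_eq_getElem?_getD, List.getElem?_set_self (hlen ▸ hi_lt)]
    · rw [List.getD_eq_getElem?_getD (l := used.set i true),
        List.getElem?_set_ne (fun he => hji he.symm), ← List.getD_eq_getElem?_getD]
      simp [hji]
  rw [hstep, h]
  simp only [List.filter_cons]
  rw [if_neg (by simp)]
  apply List.filter_eq_self.mpr
  intro j hj
  have : j ≠ i := fun he => (List.nodup_cons.mp hnodup).1 (he ▸ hj)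
  simp [this]

-- the coupled fold: A's (acc, used) state vs B's (dict, acc) state
theorem pv_fold_eq (l1 : List Int) :
    ∀ (l2 : List Int) (acc : List Int) (used : List Bool) (d : PySem.Dict Int (List Int)),
    used.length = l1.length →
    (∀ v, d.getD v [] = (pvAvail l1 used v).map (fun i => Int.ofNat i)) →
    (l2.foldl (fun st item2 =>
      match pvFirstIdx l1 st.2 item2 with
      | some i => (st.1 ++ [(i : Int)], st.2.set i true)
      | none => st) (acc, used)).1
    = (l2.foldl (fun st v =>
      match st.1.getD v [] with
      | [] => st
      | i :: rest => (st.1.insert v rest, st.2 ++ [i])) (d, acc)).2 := by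
  intro l2
  induction l2 with
  | nil => intro acc used d _ _; rfl
  | cons x l2 ih =>
    intro acc used d hlen hR
    simp only [List.foldl_cons]
    rcases hA : pvAvail l1 used x with _ | ⟨i, rest⟩
    · -- no available index: both sides skip
      have h1 : pvFirstIdx l1 used x = none := by rw [pv_firstIdx_eq, hA]; rfl
      have h2 : d.getD x [] = [] := by rw [hR, hA]; rfl
      simp only [h1, h2]
      exact ih acc used d hlen hR
    · -- head i is picked by both sides
      have h1 : pvFirstIdx l1 used x = some i := by rw [pv_firstIdx_eq, hA]; rfl
      have h2 : d.getD x [] = (i : Int) :: rest.map (fun i => Int.ofNat i) := by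
        rw [hR, hA]; rfl
      have hx : l1.getD i 0 = x := by
        have hm : i ∈ pvAvail l1 used x := by rw [hA]; exact List.mem_cons_self
        have h' := List.of_mem_filter hm
        simp only [Bool.and_eq_true, beq_iff_eq] at h'
        exact h'.2
      simp only [h1, h2]
      apply ih
      · simpa using hlen
      · intro v
        by_cases hv : v = x
        · subst hv
          rw [PySem.Dict.getD_insert_self, pv_avail_set_head l1 used v i rest hlen hA]
        · rw [PySem.Dict.getD_insert_of_ne _ _ _ hv,
            pv_avail_set_ne l1 used x v i hx hv, hR]

-- ===== VERDICT (by name: the statement is the Claim_ definition above) =====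
theorem get_permutation_indices_spec : Claim_equal_get_permutation_indices := by
  intro list1 list2 _
  unfold Spec_get_permutation_indices get_permutation_indices get_permutation_indices_alt
  split
  · rfl
  · apply pv_fold_eq
    · simp
    · intro v
      rw [pv_buildPos_getD, pv_avail_init]
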